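-- pv_equiv track=rewrite | github.com/AndrewLrrr/stepik-data-structures | module1/task2_tree_height_decoder.py | tree_height_decoder
-- ===== SOURCE A (Python) =====
-- def tree_height_decoder(code):
--     tree_map = {}
--     root = 0
--     height = 1
--
--     if len(code) == 1:
--         return 1
--
--     for idx, item in enumerate(code):
--         if item == -1:
--             root = idx
--         else:
--             if item not in tree_map:
--                 tree_map[item] = [idx]
--             else:
--                 tree_map[item].append(idx)
--
--     roots = tree_map[root]
--
--     while roots:
--         height += 1
--         tmp_roots = roots
--         roots = []
--         for root in tmp_roots:
--             if root in tree_map: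
--                 roots += tree_map[root]
--
--     return height
-- ===== SOURCE B (Python) =====
-- def tree_height_decoder(code):
--     if len(code) == 1:
--         return 1
--     tree_map = {}
--     root = 0
--     for idx, item in enumerate(code):
--         if item == -1:
--             root = idx
--         elif item not in tree_map:
--             tree_map[item] = [idx]
--         else:
--             tree_map[item].append(idx)
--
--     def depth(node):
--         return 1 + max((depth(c) for c in tree_map.get(node, [])), default=0)
--
--     return 1 + max((depth(c) for c in tree_map[root]), default=0)
-- ===== Notes on version B (the rewrite author's own statement) =====
-- stated objective: alternative
-- what changed: A's level-by-level BFS (frontier list rebuilt each round plus a height counter) is replaced by a recursive DFS: depth(node) = 1 + max of the children's depths (default 0), evaluated once from the root over the same children map.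
import Mathlib
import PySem

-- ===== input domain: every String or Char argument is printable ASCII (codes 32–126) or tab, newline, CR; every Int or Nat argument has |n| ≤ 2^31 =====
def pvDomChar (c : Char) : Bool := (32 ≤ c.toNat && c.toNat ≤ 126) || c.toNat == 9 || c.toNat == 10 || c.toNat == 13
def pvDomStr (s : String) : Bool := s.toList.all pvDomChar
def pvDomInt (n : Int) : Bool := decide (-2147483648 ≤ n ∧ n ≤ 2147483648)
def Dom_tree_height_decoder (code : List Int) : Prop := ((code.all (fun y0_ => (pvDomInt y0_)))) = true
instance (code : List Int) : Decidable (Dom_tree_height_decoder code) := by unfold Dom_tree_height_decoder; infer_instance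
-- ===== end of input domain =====

-- B replaces A's level-by-level BFS with a recursive DFS (depth(node) = 1 + max of children depths)
-- over the same children map; equal cost, different decomposition (objective: alternative).

-- ===== PORT A =====
-- Both Pythons build the children map (parent value -> list of child indices) and the root
-- (last index holding -1, default 0) with the identical loop; ported once, used by both ports.
def pvBuild (code : List Int) : PySem.Dict Int (List Int) × Int :=
  (PySem.List.enumerate code).foldl
    (fun s p =>
      if p.2 = -1 then (s.1, p.1)
      else
        match s.1.get? p.2 with
        | none => (s.1.insert p.2 [p.1], s.2)          -- item not in tree_map
        | some l => (s.1.insert p.2 (l ++ [p.1]), s.2)) -- tree_map[item].append(idx)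
    (PySem.Dict.empty, 0)

-- one BFS round: for root in tmp_roots: if root in tree_map: roots += tree_map[root]
def pvNext (d : PySem.Dict Int (List Int)) (F : List Int) : List Int :=
  F.foldl (fun acc r => if d.contains r then acc ++ d.getD r [] else acc) []

-- while roots: height += 1; roots = pvNext roots.  Fuel code.length bounds the number of
-- nonempty levels on every input Pre_ admits (the fuel-0 branch is a totality guard only).
def pvLoop (d : PySem.Dict Int (List Int)) : Nat → List Int → Int → Int
  | 0, _, h => h
  | f + 1, F, h => if F = [] then h else pvLoop d f (pvNext d F) (h + 1)

def tree_height_decoder (code : List Int) : Int :=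
  if code.length = 1 then 1
  else
    let st := pvBuild code
    -- roots = tree_map[root]: KeyError when the key is absent — Pre_ excludes those inputs
    pvLoop st.1 code.length (st.1.getD st.2 []) 1

-- ===== PORT B =====
-- depth(node) = 1 + max((depth(c) for c in tree_map.get(node, [])), default=0).
-- Fuel code.length bounds the recursion depth of every child of the root on every input Pre_ admits.
def pvDepth (d : PySem.Dict Int (List Int)) : Nat → Int → Int
  | 0, _ => 0
  | f + 1, node => 1 + PySem.List.maxD ((d.getD node []).map (pvDepth d f)) (fun y => y) 0

def tree_height_decoder_alt (code : List Int) : Int :=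
  if code.length = 1 then 1
  else
    let st := pvBuild code
    -- tree_map[root]: KeyError when the key is absent — Pre_ excludes those inputs
    1 + PySem.List.maxD ((st.1.getD st.2 []).map (pvDepth st.1 code.length)) (fun y => y) 0

-- ===== PRECONDITION & SPEC =====
-- A's root: the last index holding -1, default 0 (same scan as the ports' build loop).
def pvRoot (code : List Int) : Int :=
  (PySem.List.enumerate code).foldl (fun r p => if p.2 = -1 then p.1 else r) 0

-- One upward parent step from x: code[x] for an in-range index, -1 (an absorbing
-- non-index) otherwise; pvChain iterates it.  These walk the input's parent pointers,
-- a shape condition on the encoding, not either algorithm (which walk CHILDREN lists).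
def pvParent (code : List Int) (x : Int) : Int :=
  if 0 ≤ x ∧ x < (code.length : Int) then code.getD x.toNat 0 else -1

def pvChain (code : List Int) : Nat → Int → Int
  | 0, x => x
  | k + 1, x => pvChain code k (pvParent code x)

-- Pre_ is exactly where A returns normally (singletons aside, answered before any lookup):
-- the root index must occur as a parent value (otherwise A raises KeyError at
-- tree_map[root]) and the root must not lie on a parent cycle (otherwise A's BFS
-- re-enters the root's level forever and diverges; only rootless codes, where A's root
-- silently defaults to index 0, can have such a cycle).
def Pre_tree_height_decoder (code : List Int) : Prop :=
  code.length = 1 ∨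
    (pvRoot code ∈ code ∧
      ∀ k : Nat, k ≤ code.length → 1 ≤ k → pvChain code k (pvRoot code) ≠ pvRoot code)
instance (code : List Int) : Decidable (Pre_tree_height_decoder code) := by
  unfold Pre_tree_height_decoder; infer_instance

def pvWitness_tree_height_decoder : List Int := [-1, 0]

def Spec_tree_height_decoder (code : List Int) (out : Int) : Prop := out = tree_height_decoder_alt code
instance (code : List Int) (out : Int) : Decidable (Spec_tree_height_decoder code out) := by unfold Spec_tree_height_decoder; infer_instance

-- ===== CLAIM (what is proved, stated in full; the proofs are below) =====
def Claim_equal_tree_height_decoder : Prop := ∀ (code : List Int), Dom_tree_height_decoder code → Pre_tree_height_decoder code → Spec_tree_height_decoder code (tree_height_decoder code)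

-- ===== LEMMAS AND PROOFS =====

-- running max from 0, the common value both ports' height computations reduce to
def pvM0 (l : List Int) : Int := l.foldl max 0

theorem pvFoldl_max_init (t : List Int) : ∀ a b : Int, t.foldl max (max a b) = max a (t.foldl max b) := by
  induction t with
  | nil => intro a b; rfl
  | cons x t ih =>
      intro a b
      simp only [List.foldl_cons, max_assoc]
      exact ih a (max b x)

theorem pvM0_nonneg (l : List Int) : 0 ≤ pvM0 l :=
  (PySem.List.le_foldl_max l 0).1

theorem pvM0_cons (a : Int) (l : List Int) : pvM0 (a :: l) = max a (pvM0 l) := by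
  have h : max (0 : Int) a = max a 0 := max_comm 0 a
  simp only [pvM0, List.foldl_cons, h, pvFoldl_max_init l a 0]

theorem pvM0_append (l₁ l₂ : List Int) : pvM0 (l₁ ++ l₂) = max (pvM0 l₁) (pvM0 l₂) :=
  calc pvM0 (l₁ ++ l₂) = l₂.foldl max (pvM0 l₁) := by simp [pvM0, List.foldl_append]
    _ = l₂.foldl max (max (pvM0 l₁) 0) := by rw [max_eq_left (pvM0_nonneg l₁)]
    _ = max (pvM0 l₁) (l₂.foldl max 0) := pvFoldl_max_init l₂ _ 0
    _ = max (pvM0 l₁) (pvM0 l₂) := rfl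

theorem pvMaxD_eq_M0 (l : List Int) (h : ∀ x ∈ l, 0 ≤ x) :
    PySem.List.maxD l (fun y => y) 0 = pvM0 l := by
  cases l with
  | nil => rfl
  | cons a t =>
      have h1 : PySem.List.maxD (a :: t) (fun y => y) 0 = t.foldl max a := by
        simp [PySem.List.maxD, PySem.List.max?_id_cons]
      have h2 : max (0 : Int) a = max a 0 := max_comm 0 a
      have h3 : max a (0 : Int) = a := max_eq_left (h a (List.mem_cons_self))
      simp only [pvM0, List.foldl_cons, h1, h2, h3]

theorem pvDepth_nonneg (d : PySem.Dict Int (List Int)) : ∀ (f : Nat) (x : Int), 0 ≤ pvDepth d f x := by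
  intro f
  induction f with
  | zero => intro x; simp [pvDepth]
  | succ f ih =>
      intro x
      have hnn : ∀ y ∈ ((d.getD x []).map (pvDepth d f)), 0 ≤ y := by
        intro y hy
        rcases List.mem_map.1 hy with ⟨c, _, rfl⟩
        exact ih c
      have := pvM0_nonneg ((d.getD x []).map (pvDepth d f))
      simp only [pvDepth, pvMaxD_eq_M0 _ hnn]
      omega

theorem pvDepth_succ (d : PySem.Dict Int (List Int)) (f : Nat) (x : Int) :
    pvDepth d (f + 1) x = 1 + pvM0 ((d.getD x []).map (pvDepth d f)) := by
  have hnn : ∀ y ∈ ((d.getD x []).map (pvDepth d f)), 0 ≤ y := by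
    intro y hy
    rcases List.mem_map.1 hy with ⟨c, _, rfl⟩
    exact pvDepth_nonneg d f c
  simp only [pvDepth, pvMaxD_eq_M0 _ hnn]

theorem pvNext_eq (d : PySem.Dict Int (List Int)) (F : List Int) :
    pvNext d F = F.flatMap (fun r => d.getD r []) := by
  have hfun : ∀ (acc : List Int) (r : Int),
      (if d.contains r then acc ++ d.getD r [] else acc) = acc ++ d.getD r [] := by
    intro acc r
    by_cases h : d.contains r
    · simp [h]
    · have hn : d.get? r = none :=
        (PySem.Dict.get?_eq_none_iff_contains d r).2 (Bool.not_eq_true _ ▸ eq_false_of_ne_true h)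
      simp [h, PySem.Dict.getD_eq_get?_getD, hn]
  have : ∀ (F : List Int) (acc : List Int),
      F.foldl (fun acc r => if d.contains r then acc ++ d.getD r [] else acc) acc
        = acc ++ F.flatMap (fun r => d.getD r []) := by
    intro F
    induction F with
    | nil => intro acc; simp
    | cons x t ih =>
        intro acc
        rw [List.foldl_cons, hfun, ih, List.flatMap_cons, List.append_assoc]
  simpa using this F []

theorem pvM0_flat (c : Int → List Int) (g : Int → Int) (F : List Int) :
    pvM0 ((F.flatMap c).map g) = pvM0 (F.map (fun x => pvM0 ((c x).map g))) := by
  induction F with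
  | nil => rfl
  | cons a t ih =>
      simp only [List.flatMap_cons, List.map_append, List.map_cons, pvM0_append, pvM0_cons, ih]

theorem pvM0_map_one_add (t : Int → Int) (hnn : ∀ x : Int, 0 ≤ t x) :
    ∀ (l : List Int), l ≠ [] → pvM0 (l.map (fun x => 1 + t x)) = 1 + pvM0 (l.map t) := by
  intro l
  induction l with
  | nil => intro h; exact absurd rfl h
  | cons a l ih =>
      intro _
      cases l with
      | nil =>
          have h1 : max (1 + t a) (0 : Int) = 1 + t a := max_eq_left (by have := hnn a; omega)
          have h2 : max (t a) (0 : Int) = t a := max_eq_left (hnn a)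
          simp only [List.map_cons, List.map_nil, pvM0_cons,
            show pvM0 ([] : List Int) = 0 from rfl]
          rw [h1, h2]
      | cons b l' =>
          have hne : (b :: l') ≠ ([] : List Int) := by simp
          have ihh := ih hne
          simp only [List.map_cons] at ihh ⊢
          rw [pvM0_cons, ihh]
          conv_rhs => rw [pvM0_cons]
          omega

theorem pvM0_map_zero (F : List Int) : pvM0 (F.map (fun _ => (0 : Int))) = 0 := by
  induction F with
  | nil => rfl
  | cons a t ih => rw [List.map_cons, pvM0_cons, ih]; simp

theorem pvLoop_eq (d : PySem.Dict Int (List Int)) :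
    ∀ (f : Nat) (F : List Int) (h : Int),
      pvLoop d f F h = h + pvM0 (F.map (pvDepth d f)) := by
  intro f
  induction f with
  | zero =>
      intro F h
      have h0 : List.map (pvDepth d 0) F = List.map (fun _ => (0 : Int)) F :=
        List.map_congr_left (fun x _ => rfl)
      rw [h0, pvM0_map_zero]
      simp [pvLoop]
  | succ f ih =>
      intro F h
      by_cases hF : F = []
      · subst hF; simp [pvLoop, pvM0]
      · set G : Int → Int := fun x => pvM0 ((d.getD x []).map (pvDepth d f)) with hG
        have hmap : F.map (pvDepth d (f + 1)) = F.map (fun x => 1 + G x) :=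
          List.map_congr_left (fun x _ => pvDepth_succ d f x)
        have hflat : pvM0 ((pvNext d F).map (pvDepth d f)) = pvM0 (F.map G) := by
          rw [pvNext_eq]; exact pvM0_flat _ _ F
        have hone : pvM0 (F.map (fun x => 1 + G x)) = 1 + pvM0 (F.map G) :=
          pvM0_map_one_add G (fun x => pvM0_nonneg _) F hF
        rw [show pvLoop d (f + 1) F h = pvLoop d f (pvNext d F) (h + 1) from by
              rw [pvLoop, if_neg hF],
            ih, hflat, hmap, hone]
        omega

-- ===== VERDICT (by name: the statement is the Claim_ definition above) =====
theorem tree_height_decoder_spec : Claim_equal_tree_height_decoder := by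
  intro code _ _
  unfold Spec_tree_height_decoder tree_height_decoder tree_height_decoder_alt
  by_cases hlen : code.length = 1
  · simp [hlen]
  · simp only [hlen, if_false]
    rw [pvLoop_eq,
        pvMaxD_eq_M0 _ (fun y hy => by
          rcases List.mem_map.1 hy with ⟨c, _, rfl⟩
          exact pvDepth_nonneg _ _ c)]
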